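-- pv_equiv track=rewrite | github.com/sueszli/vector-database-benchmark | dataset/python-mutated/dpll.py | pl_true_int_repr
-- ===== SOURCE A (Python) =====
-- def pl_true_int_repr(clause, model={}):
--     if False:
--         while True:
--             i = 10
--     '\n    Lightweight version of pl_true.\n    Argument clause represents the set of args of an Or clause. This is used\n    inside dpll_int_repr, it is not meant to be used directly.\n\n    >>> from sympy.logic.algorithms.dpll import pl_true_int_repr\n    >>> pl_true_int_repr({1, 2}, {1: False})\n    >>> pl_true_int_repr({1, 2}, {1: False, 2: False})\n    False\n\n    '
--     result = False
--     for lit in clause: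
--         if lit < 0:
--             p = model.get(-lit)
--             if p is not None:
--                 p = not p
--         else:
--             p = model.get(lit)
--         if p is True:
--             return True
--         elif p is None:
--             result = None
--     return result
-- ===== SOURCE B (Python) =====
-- def pl_true_int_repr(clause, model={}):
--     # Invert the model once into two polarity sets, then answer by membership.
--     true_vars = set()
--     false_vars = set()
--     for v, b in model.items():
--         if b:
--             true_vars.add(v)
--         else:
--             false_vars.add(v)
--     if any((-lit in false_vars) if lit < 0 else (lit in true_vars) for lit in clause):
--         return True
--     if any((-lit if lit < 0 else lit) not in true_vars
--            and (-lit if lit < 0 else lit) not in false_vars for lit in clause):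
--         return None
--     return False
-- ===== Notes on version B (the rewrite author's own statement) =====
-- stated objective: alternative
-- what changed: Instead of A's single early-exit loop that looks each literal up in the model dict with sign-dependent negation, B first inverts the model into two polarity sets (variables assigned True / assigned False) and then decides the clause by set membership: any literal satisfied by its polarity set gives True, else any literal whose variable is in neither set gives None, else False.
import Mathlib
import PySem

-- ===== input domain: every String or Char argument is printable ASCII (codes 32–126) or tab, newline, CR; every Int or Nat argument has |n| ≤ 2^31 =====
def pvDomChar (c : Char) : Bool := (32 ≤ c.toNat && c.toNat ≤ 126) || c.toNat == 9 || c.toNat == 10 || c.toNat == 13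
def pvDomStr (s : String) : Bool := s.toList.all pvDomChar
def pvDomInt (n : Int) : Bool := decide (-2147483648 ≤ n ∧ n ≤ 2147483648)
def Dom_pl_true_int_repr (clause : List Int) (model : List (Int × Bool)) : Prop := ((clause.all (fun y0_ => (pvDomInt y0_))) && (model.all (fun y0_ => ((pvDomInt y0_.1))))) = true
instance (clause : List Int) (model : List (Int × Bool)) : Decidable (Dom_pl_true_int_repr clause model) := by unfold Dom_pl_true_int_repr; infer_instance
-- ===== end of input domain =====

-- B inverts the model once into two polarity sets (variables assigned True / assigned False) and decides the clause by set membership, instead of A's early-exit loop of per-literal dict lookups with sign-dependent negation; same O(n) cost, different data structure.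


-- ===== PORT A =====
-- model.get(k) on the dict argument: first-match lookup in the association list
def pvModelGet (model : List (Int × Bool)) (k : Int) : Option Bool :=
  (PySem.Dict.mk model).get? k

-- the 'for lit in clause' loop of A, carrying the mutable 'result'
def pvTrueLoop (model : List (Int × Bool)) : List Int → Option Bool → Option Bool
  | [], result => result
  | lit :: rest, result =>
    let p : Option Bool :=
      if lit < 0 then
        match pvModelGet model (-lit) with
        | some b => some (!b)      -- 'if p is not None: p = not p'
        | none => none
      else pvModelGet model lit
    if p = some true then some true
    else if p = none then pvTrueLoop model rest none
    else pvTrueLoop model rest result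

def pl_true_int_repr (clause : List Int) (model : List (Int × Bool)) : Option Bool :=
  pvTrueLoop model clause (some false)

-- ===== PORT B =====
-- the 'for v, b in model.items()' loop building the two polarity sets
def pvPolarity (model : List (Int × Bool)) : PySem.Set Int × PySem.Set Int :=
  model.foldl
    (fun st p => if p.2 then (PySem.Set.add st.1 p.1, st.2) else (st.1, PySem.Set.add st.2 p.1))
    (PySem.Set.empty, PySem.Set.empty)

def pl_true_int_repr_alt (clause : List Int) (model : List (Int × Bool)) : Option Bool :=
  let tv := (pvPolarity model).1
  let fv := (pvPolarity model).2
  if clause.any (fun lit => if lit < 0 then PySem.Set.contains fv (-lit) else PySem.Set.contains tv lit) then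
    some true
  else if clause.any (fun lit =>
      !(PySem.Set.contains tv (if lit < 0 then -lit else lit)) &&
      !(PySem.Set.contains fv (if lit < 0 then -lit else lit))) then
    none
  else some false

-- ===== PRECONDITION & SPEC =====
-- Pre_ restricts the association list to distinct keys: the Python argument is a dict, in which
-- duplicate keys are unrepresentable, so no input A accepts is excluded.
def Pre_pl_true_int_repr (clause : List Int) (model : List (Int × Bool)) : Prop :=
  (model.map Prod.fst).Nodup
instance (clause : List Int) (model : List (Int × Bool)) : Decidable (Pre_pl_true_int_repr clause model) := by unfold Pre_pl_true_int_repr; infer_instance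

def pvWitness_pl_true_int_repr : List Int × (List (Int × Bool)) := ([1, -2], [(1, false), (3, true)])

def Spec_pl_true_int_repr (clause : List Int) (model : List (Int × Bool)) (out : Option Bool) : Prop := out = pl_true_int_repr_alt clause model
instance (clause : List Int) (model : List (Int × Bool)) (out : Option Bool) : Decidable (Spec_pl_true_int_repr clause model out) := by unfold Spec_pl_true_int_repr; infer_instance

-- ===== CLAIM (what is proved, stated in full; the proofs are below) =====
def Claim_equal_pl_true_int_repr : Prop := ∀ (clause : List Int) (model : List (Int × Bool)), Dom_pl_true_int_repr clause model → Pre_pl_true_int_repr clause model → Spec_pl_true_int_repr clause model (pl_true_int_repr clause model)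

-- ===== LEMMAS AND PROOFS =====
-- A's per-literal value (the 'p' of A's loop body), named for the proofs
def pvEvalLit (model : List (Int × Bool)) (lit : Int) : Option Bool :=
  if lit < 0 then
    match pvModelGet model (-lit) with
    | some b => some (!b)
    | none => none
  else pvModelGet model lit

-- characterisation of A's loop for an arbitrary accumulator value
theorem pvTrueLoop_eq (model : List (Int × Bool)) (clause : List Int) :
    ∀ res : Option Bool,
      pvTrueLoop model clause res =
        (if clause.any (fun lit => pvEvalLit model lit = some true) then some true
         else if res = none ∨ clause.any (fun lit => pvEvalLit model lit = none) then none
         else res) := by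
  induction clause with
  | nil => intro res; simp [pvTrueLoop]
  | cons lit rest ih =>
    intro res
    have hp : (if lit < 0 then
        match pvModelGet model (-lit) with
        | some b => some (!b)
        | none => none
      else pvModelGet model lit) = pvEvalLit model lit := rfl
    simp only [pvTrueLoop, hp, List.any_cons]
    by_cases h1 : pvEvalLit model lit = some true
    · simp [h1]
    · by_cases h2 : pvEvalLit model lit = none
      · simp [h2, ih]
      · simp [h1, h2, ih]

-- membership in the polarity sets = membership of the signed pair in the model list
theorem mem_pvPolarity (model : List (Int × Bool)) (v : Int) :
    (v ∈ (pvPolarity model).1 ↔ (v, true) ∈ model) ∧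
    (v ∈ (pvPolarity model).2 ↔ (v, false) ∈ model) := by
  unfold pvPolarity
  suffices h : ∀ (l : List (Int × Bool)) (tv fv : PySem.Set Int),
      (v ∈ (l.foldl (fun st p => if p.2 then (PySem.Set.add st.1 p.1, st.2) else (st.1, PySem.Set.add st.2 p.1)) (tv, fv)).1
        ↔ (v, true) ∈ l ∨ v ∈ tv) ∧
      (v ∈ (l.foldl (fun st p => if p.2 then (PySem.Set.add st.1 p.1, st.2) else (st.1, PySem.Set.add st.2 p.1)) (tv, fv)).2
        ↔ (v, false) ∈ l ∨ v ∈ fv) by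
    have := h model PySem.Set.empty PySem.Set.empty
    simpa [PySem.Set.empty] using this
  intro l
  induction l with
  | nil => intro tv fv; simp
  | cons p rest ih =>
    intro tv fv
    obtain ⟨k, b⟩ := p
    cases b <;>
      simp [List.foldl_cons, ih, PySem.Set.mem_add, Prod.ext_iff] <;> tauto

-- under distinct keys, A's lookup result for a variable is read off the polarity sets
theorem pvModelGet_eq (model : List (Int × Bool)) (hnd : (model.map Prod.fst).Nodup) (v : Int) :
    pvModelGet model v = (if v ∈ (pvPolarity model).1 then some true
      else if v ∈ (pvPolarity model).2 then some false else none) := by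
  have hkeys : (PySem.Dict.mk model).keys.Nodup := by
    simpa [PySem.Dict.keys] using hnd
  have hmem : ∀ b : Bool, (pvModelGet model v = some b) ↔ (v, b) ∈ model := by
    intro b
    unfold pvModelGet
    exact PySem.Dict.get?_eq_some_iff_mem_items (PySem.Dict.mk model) v b hkeys
  have h1 := (mem_pvPolarity model v).1
  have h2 := (mem_pvPolarity model v).2
  by_cases ht : v ∈ (pvPolarity model).1
  · simp only [ht, if_pos]
    exact (hmem true).2 (h1.1 ht)
  · by_cases hf : v ∈ (pvPolarity model).2
    · simp only [ht, hf, if_pos]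
      exact (hmem false).2 (h2.1 hf)
    · simp only [ht, hf]
      match hg : pvModelGet model v with
      | none => rfl
      | some true => exact absurd (h1.2 ((hmem true).1 hg)) ht
      | some false => exact absurd (h2.2 ((hmem false).1 hg)) hf

-- distinct keys: no variable lies in both polarity sets
theorem pvPolarity_disjoint (model : List (Int × Bool)) (hnd : (model.map Prod.fst).Nodup)
    (v : Int) (h1 : v ∈ (pvPolarity model).1) (h2 : v ∈ (pvPolarity model).2) : False := by
  have e1 := pvModelGet_eq model hnd v
  rw [if_pos h1] at e1
  have e2 := pvModelGet_eq model hnd v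
  rw [if_pos h1] at e2
  have ht : (v, true) ∈ model := (mem_pvPolarity model v).1.1 h1
  have hf : (v, false) ∈ model := (mem_pvPolarity model v).2.1 h2
  have hkeys : (PySem.Dict.mk model).keys.Nodup := by
    simpa [PySem.Dict.keys] using hnd
  have g1 : (PySem.Dict.mk model).get? v = some true :=
    PySem.Dict.get?_of_mem_items (PySem.Dict.mk model) ht hkeys
  have g2 : (PySem.Dict.mk model).get? v = some false :=
    PySem.Dict.get?_of_mem_items (PySem.Dict.mk model) hf hkeys
  simp [g1] at g2

-- per-literal: A's 'p is True' test is B's satisfaction test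
theorem evalLit_true_iff (model : List (Int × Bool)) (hnd : (model.map Prod.fst).Nodup) (lit : Int) :
    (pvEvalLit model lit = some true) ↔
      (if lit < 0 then PySem.Set.contains (pvPolarity model).2 (-lit)
       else PySem.Set.contains (pvPolarity model).1 lit) = true := by
  unfold pvEvalLit
  by_cases h : lit < 0 <;>
    simp only [h, if_true, if_false, pvModelGet_eq model hnd] <;>
    split_ifs with ha hb <;>
    simp_all [PySem.Set.contains] <;>
    exact fun hc => pvPolarity_disjoint model hnd _ ha hc

-- per-literal: A's 'p is None' test is B's unassigned test
theorem evalLit_none_iff (model : List (Int × Bool)) (hnd : (model.map Prod.fst).Nodup) (lit : Int) :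
    (pvEvalLit model lit = none) ↔
      (!(PySem.Set.contains (pvPolarity model).1 (if lit < 0 then -lit else lit)) &&
       !(PySem.Set.contains (pvPolarity model).2 (if lit < 0 then -lit else lit))) = true := by
  unfold pvEvalLit
  by_cases h : lit < 0 <;>
    simp only [h, if_true, if_false, pvModelGet_eq model hnd] <;>
    split_ifs <;> simp_all [PySem.Set.contains]

-- ===== VERDICT (by name: the statement is the Claim_ definition above) =====
theorem pl_true_int_repr_spec : Claim_equal_pl_true_int_repr := by
  intro clause model _ hnd
  unfold Spec_pl_true_int_repr pl_true_int_repr pl_true_int_repr_alt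
  rw [pvTrueLoop_eq]
  have htrue : clause.any (fun lit => pvEvalLit model lit = some true) =
      clause.any (fun lit => if lit < 0 then PySem.Set.contains (pvPolarity model).2 (-lit)
        else PySem.Set.contains (pvPolarity model).1 lit) := by
    refine List.any_congr rfl (fun lit => ?_)
    rw [Bool.eq_iff_iff, decide_eq_true_iff, evalLit_true_iff model hnd lit]
  have hnone : clause.any (fun lit => pvEvalLit model lit = none) =
      clause.any (fun lit =>
        !(PySem.Set.contains (pvPolarity model).1 (if lit < 0 then -lit else lit)) &&
        !(PySem.Set.contains (pvPolarity model).2 (if lit < 0 then -lit else lit))) := by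
    refine List.any_congr rfl (fun lit => ?_)
    rw [Bool.eq_iff_iff, decide_eq_true_iff, evalLit_none_iff model hnd lit]
  simp only [htrue, hnone]
  split_ifs with hA hB <;> simp_all <;> tauto
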